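-- pv_equiv track=rewrite | github.com/HsnSaboor/hadith-api-toon | scripts/convert_editions_to_toon.py | escape_toon_value
-- ===== SOURCE A (Python) =====
-- def escape_toon_value(value):
--     if value is None:
--         return "null"
--     s = str(value)
--     needs_quoting = any(c in s for c in [",", '"', ":", "\n", "\r"])
--     if needs_quoting:
--         s = s.replace('"', '""').replace("\n", "\\n").replace("\r", "\\r")
--         return f'"{s}"'
--     return s
-- ===== SOURCE B (Python) =====
-- def escape_toon_value(value):
--     # Single pass: track need-for-quoting and build the escaped text together.
--     if value is None:
--         return "null"
--     s = str(value)
--     needs_quoting = False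
--     parts = []
--     for c in s:
--         if c in ',":\n\r':
--             needs_quoting = True
--         if c == '"':
--             parts.append('""')
--         elif c == '\n':
--             parts.append('\\n')
--         elif c == '\r':
--             parts.append('\\r')
--         else:
--             parts.append(c)
--     if needs_quoting:
--         return '"' + ''.join(parts) + '"'
--     return s
-- ===== Notes on version B (the rewrite author's own statement) =====
-- stated objective: alternative
-- what changed: Replaces A's five substring scans plus three whole-string replace passes with one single pass over the characters that maintains a needs-quoting flag and appends each character's escaped form to an accumulator.
import Mathlib
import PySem

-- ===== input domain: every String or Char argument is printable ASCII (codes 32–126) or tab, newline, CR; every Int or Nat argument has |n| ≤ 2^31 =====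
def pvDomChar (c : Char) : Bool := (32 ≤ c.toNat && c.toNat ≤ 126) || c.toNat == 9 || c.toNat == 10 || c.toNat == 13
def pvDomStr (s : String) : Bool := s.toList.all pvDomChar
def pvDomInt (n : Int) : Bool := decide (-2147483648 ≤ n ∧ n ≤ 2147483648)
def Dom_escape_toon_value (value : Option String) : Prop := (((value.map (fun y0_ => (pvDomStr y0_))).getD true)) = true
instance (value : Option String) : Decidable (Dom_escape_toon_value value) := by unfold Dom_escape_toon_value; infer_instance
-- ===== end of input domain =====

-- B replaces A's five substring scans plus three replace passes by one single pass
-- keeping a needs-quoting flag and an escaped accumulator (objective: alternative).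

-- ===== PORT A =====
def escape_toon_value (value : Option String) : String :=
  match value with
  | none => "null"
  | some s =>
    let needs_quoting := [",", "\"", ":", "\n", "\r"].any (fun c => PySem.Str.isIn c s)
    if needs_quoting then
      let s1 := PySem.Str.replace s "\"" "\"\""
      let s2 := PySem.Str.replace s1 "\n" "\\n"
      let s3 := PySem.Str.replace s2 "\r" "\\r"
      "\"" ++ s3 ++ "\""
    else s

-- ===== PORT B =====
-- escaped form of one character (B's if/elif chain)
def pvEscAlt (c : Char) : List Char :=
  if c == '"' then ['"', '"']
  else if c == '\n' then ['\\', 'n']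
  else if c == '\r' then ['\\', 'r']
  else [c]

-- "c in ',\":\n\r'" test of B
def pvTrigAlt (c : Char) : Bool :=
  c == ',' || c == '"' || c == ':' || c == '\n' || c == '\r'

def escape_toon_value_alt (value : Option String) : String :=
  match value with
  | none => "null"
  | some s =>
    let r := s.toList.foldl
      (fun (st : Bool × List Char) c => (st.1 || pvTrigAlt c, st.2 ++ pvEscAlt c))
      (false, [])
    if r.1 then "\"" ++ String.ofList r.2 ++ "\"" else s

-- ===== PRECONDITION & SPEC =====
def Spec_escape_toon_value (value : Option String) (out : String) : Prop := out = escape_toon_value_alt value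
instance (value : Option String) (out : String) : Decidable (Spec_escape_toon_value value out) := by unfold Spec_escape_toon_value; infer_instance

-- ===== CLAIM (what is proved, stated in full; the proofs are below) =====
def Claim_equal_escape_toon_value : Prop := ∀ (value : Option String), Dom_escape_toon_value value → Spec_escape_toon_value value (escape_toon_value value)

-- ===== LEMMAS AND PROOFS =====

-- A single-character replace is a per-character flatMap.
theorem replace_go_single (a : Char) (new : List Char) :
    ∀ (l : List Char) (fuel : Nat) (acc : List Char), l.length ≤ fuel →
      PySem.Chars.replace.go [a] new fuel l acc
        = acc.reverse ++ l.flatMap (fun c => if c == a then new else [c]) := by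
  intro l
  induction l with
  | nil =>
    intro fuel acc _
    cases fuel <;> simp [PySem.Chars.replace.go]
  | cons c t ih =>
    intro fuel acc hfuel
    cases fuel with
    | zero => simp at hfuel
    | succ f =>
      by_cases hc : c = a
      · subst hc
        have : List.isPrefixOf [c] (c :: t) = true := by simp [List.isPrefixOf]
        simp only [PySem.Chars.replace.go, this, if_pos]
        have hdrop : List.drop [c].length (c :: t) = t := rfl
        rw [hdrop, ih f (new.reverse ++ acc) (by simpa using Nat.lt_succ_iff.mp (by simpa using hfuel))]
        simp
      · have : List.isPrefixOf [a] (c :: t) = false := by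
          simp [List.isPrefixOf, Ne.symm hc]
        simp only [PySem.Chars.replace.go, this, Bool.false_eq_true, if_neg, not_false_iff]
        rw [ih f (c :: acc) (by simpa using Nat.lt_succ_iff.mp (by simpa using hfuel))]
        simp [hc]

theorem replace_single (l : List Char) (a : Char) (new : List Char) :
    PySem.Chars.replace l [a] new = l.flatMap (fun c => if c == a then new else [c]) := by
  rw [PySem.Chars.replace]
  simp only [List.isEmpty_cons, Bool.false_eq_true, if_neg, not_false_iff]
  simpa using replace_go_single a new l l.length [] (le_refl _)

-- B's fold computes the flag and the escaped accumulator independently.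
theorem fold_spec :
    ∀ (l : List Char) (b : Bool) (acc : List Char),
      l.foldl (fun (st : Bool × List Char) c => (st.1 || pvTrigAlt c, st.2 ++ pvEscAlt c)) (b, acc)
        = (b || l.any pvTrigAlt, acc ++ l.flatMap pvEscAlt) := by
  intro l
  induction l with
  | nil => intro b acc; simp
  | cons c t ih =>
    intro b acc
    simp [List.foldl_cons, ih, Bool.or_assoc, List.flatMap_cons]

-- The three chained single-character replaces compose to pvEscAlt.
theorem esc_composite (c : Char) :
    List.flatMap (fun x => List.flatMap (fun y => if y == '\r' then ['\\', 'r'] else [y])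
        (if x == '\n' then ['\\', 'n'] else [x]))
      (if c == '"' then ['"', '"'] else [c]) = pvEscAlt c := by
  by_cases h1 : c = '"'
  · subst h1; decide
  · by_cases h2 : c = '\n'
    · subst h2; decide
    · by_cases h3 : c = '\r'
      · subst h3; decide
      · simp [pvEscAlt, h1, h2, h3]

theorem isIn_single (a : Char) (l : List Char) :
    PySem.Chars.isIn [a] l = l.contains a := by
  by_cases h : a ∈ l
  · rw [(PySem.Chars.isIn_iff_infix [a] l).mpr ((List.singleton_infix_iff a l).mpr h)]
    simp [h]
  · rw [(PySem.Chars.isIn_eq_false_iff [a] l).mpr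
      (fun hinf => h ((List.singleton_infix_iff a l).mp hinf))]
    simp [h]

theorem any_trig (l : List Char) :
    (l.contains ',' || l.contains '"' || l.contains ':' || l.contains '\n' || l.contains '\r')
      = l.any pvTrigAlt := by
  rw [Bool.eq_iff_iff]
  simp only [Bool.or_eq_true, List.contains_iff_mem, List.any_eq_true, pvTrigAlt, beq_iff_eq]
  constructor
  · rintro ((((h | h) | h) | h) | h) <;> exact ⟨_, h, by simp⟩
  · rintro ⟨c, hc, h⟩
    rcases h with ((((h | h) | h) | h) | h) <;> subst h <;> tauto

-- ===== VERDICT (by name: the statement is the Claim_ definition above) =====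
theorem escape_toon_value_spec : Claim_equal_escape_toon_value := by
  intro value _
  unfold Spec_escape_toon_value
  cases value with
  | none => rfl
  | some s =>
    simp only [escape_toon_value, escape_toon_value_alt, fold_spec, Bool.false_or, List.nil_append]
    have hflag :
        ([",", "\"", ":", "\n", "\r"].any (fun c => PySem.Str.isIn c s))
          = s.toList.any pvTrigAlt := by
      simp only [List.any_cons, List.any_nil, Bool.or_false, PySem.Str.isIn]
      show (PySem.Chars.isIn [','] s.toList || (PySem.Chars.isIn ['"'] s.toList ||
        (PySem.Chars.isIn [':'] s.toList || (PySem.Chars.isIn ['\n'] s.toList ||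
          PySem.Chars.isIn ['\r'] s.toList)))) = _
      simp only [isIn_single]
      rw [← any_trig]
      cases s.toList.contains ',' <;> cases s.toList.contains '"' <;>
        cases s.toList.contains ':' <;> cases s.toList.contains '\n' <;>
        cases s.toList.contains '\r' <;> rfl
    rw [hflag]
    cases hq : s.toList.any pvTrigAlt with
    | false => simp
    | true =>
      simp only [if_pos]
      have hrepl :
          PySem.Str.replace (PySem.Str.replace (PySem.Str.replace s "\"" "\"\"") "\n" "\\n") "\r" "\\r"
            = String.ofList (s.toList.flatMap pvEscAlt) := by
        simp only [PySem.Str.replace, String.toList_ofList]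
        show String.ofList (PySem.Chars.replace (PySem.Chars.replace
          (PySem.Chars.replace s.toList ['"'] ['"', '"']) ['\n'] ['\\', 'n']) ['\r'] ['\\', 'r']) = _
        rw [replace_single, replace_single, replace_single, List.flatMap_assoc, List.flatMap_assoc]
        congr 1
        apply List.flatMap_congr  -- pointwise equality of the per-character escape
        intro c _
        simpa using esc_composite c
      rw [hrepl]
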